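-- pv_equiv track=rewrite | github.com/jurjsorinliviu/Transferable-Structural-Search-for-Ramsey-Graph-Construction | ramsey_reconstruct.py | graph_from_shifts_and_corrections
-- ===== SOURCE A (Python) =====
-- def empty_graph(n: int) -> list[list[int]]:
--     return [[0 for _ in range(n)] for _ in range(n)]
--
-- def add_circulant_shift(adjacency: list[list[int]], shift: int) -> None:
--     n = len(adjacency)
--     for i in range(n):
--         j = (i + shift) % n
--         if i == j:
--             continue
--         adjacency[i][j] = 1
--         adjacency[j][i] = 1
--
-- def toggle_edge(adjacency: list[list[int]], i: int, j: int) -> None: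
--     if i == j:
--         return
--     adjacency[i][j] = 1 - adjacency[i][j]
--     adjacency[j][i] = adjacency[i][j]
--
-- def graph_from_shifts(n: int, shifts: list[int] | set[int]) -> list[list[int]]:
--     adjacency = empty_graph(n)
--     for shift in sorted(set(shifts)):
--         if 0 < shift <= n // 2:
--             add_circulant_shift(adjacency, shift)
--     return adjacency
--
-- def graph_from_shifts_and_corrections(
--     n: int,
--     shifts: list[int] | set[int],
--     corrections: set[tuple[int, int]],
-- ) -> list[list[int]]:
--     adjacency = graph_from_shifts(n, shifts)
--     for i, j in sorted(corrections):
--         if 0 <= i < n and 0 <= j < n and i != j: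
--             toggle_edge(adjacency, i, j)
--     return adjacency
-- ===== SOURCE B (Python) =====
-- def graph_from_shifts_and_corrections(
--     n: int,
--     shifts: list[int] | set[int],
--     corrections: set[tuple[int, int]],
-- ) -> list[list[int]]:
--     # Valid circulant shifts.
--     half = n // 2
--     valid = {s for s in shifts if 0 < s <= half}
--     # Toggle parity per unordered pair of valid correction entries.
--     parity = {}
--     for i, j in corrections:
--         if 0 <= i < n and 0 <= j < n and i != j:
--             key = (min(i, j), max(i, j))
--             parity[key] = 1 - parity.get(key, 0)
--     # Base circulant row: entry d is the edge value at cyclic distance d.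
--     base = [0 if d == 0 else (1 if min(d, n - d) in valid else 0) for d in range(n)]
--     # Row i is the base row rotated right by i.
--     result = [base[n - i:] + base[:n - i] for i in range(n)]
--     # Apply odd-parity corrections sparsely.
--     for (a, b), v in parity.items():
--         if v:
--             result[a][b] = 1 - result[a][b]
--             result[b][a] = 1 - result[b][a]
--     return result
-- ===== Notes on version B (the rewrite author's own statement) =====
-- stated objective: alternative
-- what changed: Instead of A's mutate-in-place passes (paint edges per sorted circulant shift, then toggle edges per sorted correction), B precomputes the valid-shift set, builds one base circulant row and forms each row as its rotation, and applies corrections sparsely via a toggle-parity dict over unordered pairs, eliminating all sorting and per-shift matrix passes.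
import Mathlib
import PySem

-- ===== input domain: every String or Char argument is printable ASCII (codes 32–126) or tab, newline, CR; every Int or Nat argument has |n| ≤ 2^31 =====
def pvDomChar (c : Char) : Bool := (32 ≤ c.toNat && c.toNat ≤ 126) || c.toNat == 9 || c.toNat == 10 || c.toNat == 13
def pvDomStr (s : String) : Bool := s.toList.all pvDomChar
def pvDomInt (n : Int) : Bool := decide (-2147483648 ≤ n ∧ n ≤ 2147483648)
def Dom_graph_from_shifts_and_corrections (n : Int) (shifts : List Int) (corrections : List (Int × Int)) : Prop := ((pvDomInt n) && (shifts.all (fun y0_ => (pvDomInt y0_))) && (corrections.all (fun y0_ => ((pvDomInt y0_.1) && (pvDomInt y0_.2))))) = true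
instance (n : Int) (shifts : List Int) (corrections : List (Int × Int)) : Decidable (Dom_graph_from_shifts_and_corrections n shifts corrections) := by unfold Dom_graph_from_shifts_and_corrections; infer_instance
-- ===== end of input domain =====

-- B rebuilds the matrix cell by cell from a valid-shift set and a per-pair toggle-parity dict
-- instead of A's mutate-by-shift-then-toggle passes (objective: alternative decomposition; return value only).

-- shared subscript helpers: m[i][j] read / write, exact for the in-range
-- non-negative indices both programs use
def pvGet2 (M : List (List Int)) (i j : Int) : Int := (M.getD i.toNat []).getD j.toNat 0
def pvSet2 (M : List (List Int)) (i j : Int) (v : Int) : List (List Int) :=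
  M.set i.toNat ((M.getD i.toNat []).set j.toNat v)

-- ===== PORT A =====
def pvEmptyGraph (n : Int) : List (List Int) :=
  (PySem.List.pyRange 0 n 1).map (fun _ => (PySem.List.pyRange 0 n 1).map (fun _ => (0 : Int)))

def pvAddCirculantShift (adjacency : List (List Int)) (shift : Int) : List (List Int) :=
  let n : Int := adjacency.length
  (PySem.List.pyRange 0 n 1).foldl (fun M i =>
    let j := PySem.Int.mod (i + shift) n
    if i = j then M else pvSet2 (pvSet2 M i j 1) j i 1) adjacency

def pvToggleEdge (M : List (List Int)) (i j : Int) : List (List Int) :=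
  if i = j then M
  else
    let M1 := pvSet2 M i j (1 - pvGet2 M i j)
    pvSet2 M1 j i (pvGet2 M1 i j)

def pvGraphFromShifts (n : Int) (shifts : List Int) : List (List Int) :=
  (PySem.List.sorted (PySem.Set.ofList shifts) (fun x => x) false).foldl
    (fun M s => if 0 < s ∧ s ≤ PySem.Int.floordiv n 2 then pvAddCirculantShift M s else M)
    (pvEmptyGraph n)

def graph_from_shifts_and_corrections (n : Int) (shifts : List Int) (corrections : List (Int × Int)) : List (List Int) :=
  (PySem.List.sorted2 corrections (fun p => p.1) (fun p => p.2) false).foldl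
    (fun M p => if 0 ≤ p.1 ∧ p.1 < n ∧ 0 ≤ p.2 ∧ p.2 < n ∧ p.1 ≠ p.2 then pvToggleEdge M p.1 p.2 else M)
    (pvGraphFromShifts n shifts)

-- ===== PORT B =====
def pvValidShifts (n : Int) (shifts : List Int) : PySem.Set Int :=
  PySem.Set.ofList (shifts.filter (fun s => decide (0 < s) && decide (s ≤ PySem.Int.floordiv n 2)))

def pvParityDict (n : Int) (corrections : List (Int × Int)) : PySem.Dict (Int × Int) Int :=
  corrections.foldl (fun d p =>
    if 0 ≤ p.1 ∧ p.1 < n ∧ 0 ≤ p.2 ∧ p.2 < n ∧ p.1 ≠ p.2 then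
      d.insert (min p.1 p.2, max p.1 p.2) (1 - d.getD (min p.1 p.2, max p.1 p.2) 0)
    else d) PySem.Dict.empty

-- base circulant row: entry d is the edge value at cyclic distance d
def pvBaseRow (n : Int) (shifts : List Int) : List Int :=
  (PySem.List.pyRange 0 n 1).map (fun d =>
    if d = 0 then (0 : Int)
    else if PySem.Set.contains (pvValidShifts n shifts) (min d (n - d)) then 1 else 0)

-- row i is the base row rotated right by i (base[n-i:] + base[:n-i])
def pvRotRows (n : Int) (shifts : List Int) : List (List Int) :=
  (PySem.List.pyRange 0 n 1).map (fun i =>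
    PySem.List.slice (pvBaseRow n shifts) (some (n - i)) none ++
      PySem.List.slice (pvBaseRow n shifts) none (some (n - i)))

def graph_from_shifts_and_corrections_alt (n : Int) (shifts : List Int) (corrections : List (Int × Int)) : List (List Int) :=
  (pvParityDict n corrections).items.foldl (fun R p =>
    if p.2 ≠ 0 then
      let R1 := pvSet2 R p.1.1 p.1.2 (1 - pvGet2 R p.1.1 p.1.2)
      pvSet2 R1 p.1.2 p.1.1 (1 - pvGet2 R1 p.1.2 p.1.1)
    else R) (pvRotRows n shifts)

-- ===== PRECONDITION & SPEC =====
def Spec_graph_from_shifts_and_corrections (n : Int) (shifts : List Int) (corrections : List (Int × Int)) (out : List (List Int)) : Prop := out = graph_from_shifts_and_corrections_alt n shifts corrections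
instance (n : Int) (shifts : List Int) (corrections : List (Int × Int)) (out : List (List Int)) : Decidable (Spec_graph_from_shifts_and_corrections n shifts corrections out) := by unfold Spec_graph_from_shifts_and_corrections; infer_instance

-- ===== CLAIM (what is proved, stated in full; the proofs are below) =====
def Claim_equal_graph_from_shifts_and_corrections : Prop := ∀ (n : Int) (shifts : List Int) (corrections : List (Int × Int)), Dom_graph_from_shifts_and_corrections n shifts corrections → Spec_graph_from_shifts_and_corrections n shifts corrections (graph_from_shifts_and_corrections n shifts corrections)

-- ===== LEMMAS AND PROOFS =====

-- Shape: an n×n matrix (rows addressed through getD, as the ports do).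
def pvShape (n : Int) (M : List (List Int)) : Prop :=
  (M.length : Int) = n ∧ ∀ x : Int, 0 ≤ x → x < n → ((M.getD x.toNat []).length : Int) = n

-- Symmetric on the n×n block.
def pvSym (n : Int) (M : List (List Int)) : Prop :=
  ∀ x y : Int, 0 ≤ x → x < n → 0 ≤ y → y < n → pvGet2 M x y = pvGet2 M y x

-- does shift s (valid and in range) put an edge at cell (x,y)?
def pvValidHitB (n x y s : Int) : Bool :=
  decide (0 < s) && decide (s ≤ PySem.Int.floordiv n 2) && decide (x ≠ y) &&
    (decide (PySem.Int.mod (x + s) n = y) || decide (PySem.Int.mod (y + s) n = x))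

def pvBaseB (n : Int) (shifts : List Int) (x y : Int) : Bool := shifts.any (pvValidHitB n x y)

-- does correction entry p toggle cell (x,y)?
def pvHitC (n x y : Int) (p : Int × Int) : Bool :=
  decide (0 ≤ p.1) && decide (p.1 < n) && decide (0 ≤ p.2) && decide (p.2 < n) && decide (p.1 ≠ p.2) &&
    (decide (p = (x, y)) || decide (p = (y, x)))

-- the common cell value both programs compute
def pvCell (n : Int) (shifts : List Int) (corrections : List (Int × Int)) (x y : Int) : Int :=
  if x = y then 0
  else
    let b : Int := if pvBaseB n shifts x y then 1 else 0
    if (corrections.countP (pvHitC n x y)) % 2 = 1 then 1 - b else b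

-- touch predicate for one pass of add_circulant_shift
def pvTouch (n s x y i : Int) : Bool :=
  decide (i ≠ PySem.Int.mod (i + s) n) &&
    ((decide (x = i) && decide (y = PySem.Int.mod (i + s) n)) ||
     (decide (x = PySem.Int.mod (i + s) n) && decide (y = i)))

-- small mod toolbox (variable modulus; omega cannot divide by a variable)
lemma pvMod_eq_iff (n a r : Int) (hn : 0 < n) :
    PySem.Int.mod a n = r ↔ 0 ≤ r ∧ r < n ∧ n ∣ (a - r) := by
  rw [PySem.Int.mod_eq_emod_of_pos hn]
  constructor
  · rintro rfl
    exact ⟨Int.emod_nonneg a (by omega), Int.emod_lt_of_pos a hn,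
      ⟨a / n, by rw [Int.emod_def]; ring⟩⟩
  · rintro ⟨h0, h1, ⟨k, hk⟩⟩
    have : a = r + n * k := by omega
    rw [this, Int.add_mul_emod_self_left, Int.emod_eq_of_lt h0 h1]

lemma pvGetD_set {α : Type} (l : List α) (k : Nat) (r : α) (i : Nat) (d : α) :
    (l.set k r).getD i d = if i = k ∧ k < l.length then r else l.getD i d := by
  simp only [List.getD_eq_getElem?_getD, List.getElem?_set]
  split_ifs with h1 h2 h3 <;> simp_all

lemma pvShape_set (n : Int) (M : List (List Int)) (a b v : Int) (h : pvShape n M) :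
    pvShape n (pvSet2 M a b v) := by
  obtain ⟨hlen, hrow⟩ := h
  refine ⟨by simpa [pvSet2] using hlen, ?_⟩
  intro x hx0 hxn
  simp only [pvSet2, pvGetD_set]
  split_ifs with hc
  · rw [List.length_set]
    have ha0 : (0 : Int) ≤ (a.toNat : Int) := by positivity
    have han : (a.toNat : Int) < n := by omega
    have := hrow (a.toNat : Int) ha0 han
    simp only [Int.toNat_natCast] at this
    exact this
  · exact hrow x hx0 hxn

lemma pvGet2_set (n : Int) (M : List (List Int)) (a b x y v : Int) (h : pvShape n M)
    (ha : 0 ≤ a) (ha' : a < n) (hb : 0 ≤ b) (hb' : b < n)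
    (hx : 0 ≤ x) (hx' : x < n) (hy : 0 ≤ y) (hy' : y < n) :
    pvGet2 (pvSet2 M a b v) x y = if x = a ∧ y = b then v else pvGet2 M x y := by
  obtain ⟨hlen, hrow⟩ := h
  have haM : a.toNat < M.length := by omega
  have hrowa : ((M.getD a.toNat []).length : Int) = n := hrow a ha ha'
  have hbrow : b.toNat < (M.getD a.toNat []).length := by omega
  unfold pvGet2 pvSet2
  rw [pvGetD_set]
  by_cases hxa : x = a
  · subst hxa
    rw [if_pos ⟨rfl, haM⟩, pvGetD_set]
    by_cases hyb : y = b
    · subst hyb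
      rw [if_pos ⟨rfl, hbrow⟩, if_pos ⟨rfl, rfl⟩]
    · have hynb : y.toNat ≠ b.toNat := by omega
      rw [if_neg (by simp [hynb]), if_neg (by simp [hyb])]
  · have hxna : x.toNat ≠ a.toNat := by omega
    rw [if_neg (by simp [hxna]), if_neg (by simp [hxa])]

lemma pvShape_empty (n : Int) (hn : 0 < n) : pvShape n (pvEmptyGraph n) := by
  have hlen : ((pvEmptyGraph n).length : Int) = n := by
    simp [pvEmptyGraph, PySem.List.length_pyRange_one]
    omega
  refine ⟨hlen, ?_⟩
  intro x hx0 hxn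
  have hx : x.toNat < (pvEmptyGraph n).length := by omega
  rw [List.getD_eq_getElem _ _ hx]
  simp only [pvEmptyGraph] at hx ⊢
  rw [List.getElem_map]
  simp [PySem.List.length_pyRange_one]
  omega

lemma pvGet2_empty (n x y : Int) (hx : 0 ≤ x) (hx' : x < n) (hy : 0 ≤ y) (hy' : y < n) :
    pvGet2 (pvEmptyGraph n) x y = 0 := by
  have hn : 0 < n := by omega
  obtain ⟨hlen, -⟩ := pvShape_empty n hn
  have hx : x.toNat < (pvEmptyGraph n).length := by omega
  simp only [pvGet2]
  rw [List.getD_eq_getElem _ _ hx]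
  simp only [pvEmptyGraph] at hx ⊢
  rw [List.getElem_map]
  rcases Nat.lt_or_ge y.toNat ((PySem.List.pyRange 0 n 1).map (fun _ => (0:Int))).length with h | h
  · rw [List.getD_eq_getElem _ _ h, List.getElem_map]
  · exact List.getD_eq_default _ _ h

lemma pvACS_fold (n s x y : Int) (hn : 0 < n)
    (hx : 0 ≤ x) (hx' : x < n) (hy : 0 ≤ y) (hy' : y < n) :
    ∀ (k : Nat) (a : Int), (n - a).toNat = k → 0 ≤ a → ∀ M : List (List Int), pvShape n M →
      pvShape n ((PySem.List.pyRange a n 1).foldl (fun M i =>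
          let j := PySem.Int.mod (i + s) n
          if i = j then M else pvSet2 (pvSet2 M i j 1) j i 1) M) ∧
      pvGet2 ((PySem.List.pyRange a n 1).foldl (fun M i =>
          let j := PySem.Int.mod (i + s) n
          if i = j then M else pvSet2 (pvSet2 M i j 1) j i 1) M) x y =
        if ((PySem.List.pyRange a n 1).any (pvTouch n s x y)) = true then 1 else pvGet2 M x y := by
  intro k
  induction k with
  | zero =>
    intro a hk _ M hM
    have : PySem.List.pyRange a n 1 = [] := PySem.List.pyRange_one_eq_nil (by omega)
    simp [this, hM]
  | succ k ih =>
    intro a hk ha M hM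
    have han : a < n := by omega
    rw [PySem.List.pyRange_one_cons han]
    set j := PySem.Int.mod (a + s) n with hj
    have hj0 : 0 ≤ j := PySem.Int.mod_nonneg _ hn
    have hjn : j < n := PySem.Int.mod_lt _ hn
    have hstep : ∀ M' : List (List Int), pvShape n M' →
        pvShape n (if a = j then M' else pvSet2 (pvSet2 M' a j 1) j a 1) := by
      intro M' hM'
      by_cases hc : a = j
      · simpa [hc] using hM'
      · rw [if_neg hc]
        exact pvShape_set n _ j a 1 (pvShape_set n M' a j 1 hM')
    have hM1 : pvShape n (if a = j then M else pvSet2 (pvSet2 M a j 1) j a 1) := hstep M hM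
    have hcell1 : pvGet2 (if a = j then M else pvSet2 (pvSet2 M a j 1) j a 1) x y =
        if pvTouch n s x y a = true then 1 else pvGet2 M x y := by
      by_cases hc : a = j
      · have hf0 : pvTouch n s x y a = false := by
          simp only [pvTouch]
          rw [← hj]
          simp [hc]
        rw [if_pos hc, hf0]
        simp
      · rw [if_neg hc]
        rw [pvGet2_set n _ j a x y 1 (pvShape_set n M a j 1 hM) hj0 hjn ha han hx hx' hy hy']
        rw [pvGet2_set n M a j x y 1 hM ha han hj0 hjn hx hx' hy hy']
        by_cases h1 : x = j ∧ y = a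
        · have : pvTouch n s x y a = true := by
            simp only [pvTouch, ← hj, Bool.and_eq_true, Bool.or_eq_true, decide_eq_true_eq]
            exact ⟨hc, Or.inr ⟨h1.1, h1.2⟩⟩
          rw [if_pos h1, this]
          simp
        · rw [if_neg h1]
          by_cases h2 : x = a ∧ y = j
          · have : pvTouch n s x y a = true := by
              simp only [pvTouch, ← hj, Bool.and_eq_true, Bool.or_eq_true, decide_eq_true_eq]
              exact ⟨hc, Or.inl ⟨h2.1, h2.2⟩⟩
            rw [if_pos h2, this]
            simp
          · have hnt : ¬ (pvTouch n s x y a = true) := by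
              simp only [pvTouch, ← hj, Bool.and_eq_true, Bool.or_eq_true, decide_eq_true_eq]
              rintro ⟨hne, ⟨hxa, hyj⟩ | ⟨hxj, hya⟩⟩
              · exact h2 ⟨hxa, hyj⟩
              · exact h1 ⟨hxj, hya⟩
            have hf : pvTouch n s x y a = false := by
              revert hnt; cases pvTouch n s x y a <;> simp
            rw [if_neg h2, hf]
            simp
    rw [List.foldl_cons]
    obtain ⟨hsh, hget⟩ := ih (a + 1) (by omega) (by omega) _ hM1
    refine ⟨hsh, ?_⟩
    rw [hget, hcell1]
    rw [List.any_cons]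
    by_cases ht : pvTouch n s x y a = true <;>
      by_cases hr : ((PySem.List.pyRange (a + 1) n 1).any (pvTouch n s x y)) = true <;>
        simp [ht, hr]

lemma pvShape_acs (n : Int) (M : List (List Int)) (s : Int) (hn : 0 < n) (h : pvShape n M) :
    pvShape n (pvAddCirculantShift M s) := by
  have h1 := h.1
  simp only [pvAddCirculantShift, h1]
  exact (pvACS_fold n s 0 0 hn le_rfl hn le_rfl hn n.toNat 0 (by omega) le_rfl M h).1

lemma pvGet2_acs (n : Int) (M : List (List Int)) (s x y : Int) (hn : 0 < n) (h : pvShape n M)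
    (hx : 0 ≤ x) (hx' : x < n) (hy : 0 ≤ y) (hy' : y < n) :
    pvGet2 (pvAddCirculantShift M s) x y =
      if x ≠ y ∧ (PySem.Int.mod (x + s) n = y ∨ PySem.Int.mod (y + s) n = x) then 1
      else pvGet2 M x y := by
  have h1 := h.1
  simp only [pvAddCirculantShift, h1]
  rw [(pvACS_fold n s x y hn hx hx' hy hy' n.toNat 0 (by omega) le_rfl M h).2]
  have hiff : ((PySem.List.pyRange 0 n 1).any (pvTouch n s x y)) = true ↔
      (x ≠ y ∧ (PySem.Int.mod (x + s) n = y ∨ PySem.Int.mod (y + s) n = x)) := by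
    rw [List.any_eq_true]
    constructor
    · rintro ⟨i, hmem, hti⟩
      rw [PySem.List.mem_pyRange_one] at hmem
      simp only [pvTouch, Bool.and_eq_true, Bool.or_eq_true, decide_eq_true_eq] at hti
      obtain ⟨hne, hcase⟩ := hti
      rcases hcase with ⟨hxi, hyj⟩ | ⟨hxj, hyi⟩
      · exact ⟨by omega, Or.inl (by rw [hxi]; omega)⟩
      · exact ⟨by omega, Or.inr (by rw [hyi]; omega)⟩
    · rintro ⟨hxy, hcase⟩
      rcases hcase with hmod | hmod
      · refine ⟨x, by rw [PySem.List.mem_pyRange_one]; omega, ?_⟩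
        simp [pvTouch, hmod]
        omega
      · refine ⟨y, by rw [PySem.List.mem_pyRange_one]; omega, ?_⟩
        simp [pvTouch, hmod]
        omega
  by_cases hc : x ≠ y ∧ (PySem.Int.mod (x + s) n = y ∨ PySem.Int.mod (y + s) n = x)
  · rw [if_pos (hiff.mpr hc), if_pos hc]
  · rw [if_neg (fun hh => hc (hiff.mp hh)), if_neg hc]

lemma pvGFS_fold (n x y : Int) (hn : 0 < n)
    (hx : 0 ≤ x) (hx' : x < n) (hy : 0 ≤ y) (hy' : y < n) :
    ∀ (L : List Int) (M : List (List Int)), pvShape n M →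
      pvShape n (L.foldl (fun M s =>
          if 0 < s ∧ s ≤ PySem.Int.floordiv n 2 then pvAddCirculantShift M s else M) M) ∧
      pvGet2 (L.foldl (fun M s =>
          if 0 < s ∧ s ≤ PySem.Int.floordiv n 2 then pvAddCirculantShift M s else M) M) x y =
        if (L.any (pvValidHitB n x y)) = true then 1 else pvGet2 M x y := by
  intro L
  induction L with
  | nil => intro M hM; simp [hM]
  | cons s L ih =>
    intro M hM
    rw [List.foldl_cons]
    have hM1 : pvShape n (if 0 < s ∧ s ≤ PySem.Int.floordiv n 2 then pvAddCirculantShift M s else M) := by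
      by_cases hc : 0 < s ∧ s ≤ PySem.Int.floordiv n 2
      · rw [if_pos hc]; exact pvShape_acs n M s hn hM
      · rwa [if_neg hc]
    have hcell1 : pvGet2 (if 0 < s ∧ s ≤ PySem.Int.floordiv n 2 then pvAddCirculantShift M s else M) x y =
        if pvValidHitB n x y s = true then 1 else pvGet2 M x y := by
      by_cases hc : 0 < s ∧ s ≤ PySem.Int.floordiv n 2
      · rw [if_pos hc, pvGet2_acs n M s x y hn hM hx hx' hy hy']
        by_cases hh : x ≠ y ∧ (PySem.Int.mod (x + s) n = y ∨ PySem.Int.mod (y + s) n = x)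
        · have : pvValidHitB n x y s = true := by
            simp only [pvValidHitB, Bool.and_eq_true, Bool.or_eq_true, decide_eq_true_eq]
            exact ⟨⟨⟨hc.1, hc.2⟩, hh.1⟩, hh.2⟩
          rw [if_pos hh, if_pos this]
        · have : ¬ (pvValidHitB n x y s = true) := by
            simp only [pvValidHitB, Bool.and_eq_true, Bool.or_eq_true, decide_eq_true_eq]
            rintro ⟨⟨⟨-, -⟩, hne⟩, hhit⟩
            exact hh ⟨hne, hhit⟩
          rw [if_neg hh, if_neg this]
      · have : ¬ (pvValidHitB n x y s = true) := by
          simp only [pvValidHitB, Bool.and_eq_true, Bool.or_eq_true, decide_eq_true_eq]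
          rintro ⟨⟨⟨h1, h2⟩, -⟩, -⟩
          exact hc ⟨h1, h2⟩
        rw [if_neg hc, if_neg this]
    obtain ⟨hsh, hget⟩ := ih _ hM1
    refine ⟨hsh, ?_⟩
    rw [hget, hcell1, List.any_cons]
    by_cases ht : pvValidHitB n x y s = true <;>
      by_cases hr : (L.any (pvValidHitB n x y)) = true <;> simp [ht, hr]

lemma pvShape_gfs (n : Int) (shifts : List Int) (hn : 0 < n) :
    pvShape n (pvGraphFromShifts n shifts) := by
  unfold pvGraphFromShifts
  exact (pvGFS_fold n 0 0 hn le_rfl hn le_rfl hn _ _ (pvShape_empty n hn)).1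

lemma pvGet2_gfs (n : Int) (shifts : List Int) (x y : Int) (hn : 0 < n)
    (hx : 0 ≤ x) (hx' : x < n) (hy : 0 ≤ y) (hy' : y < n) :
    pvGet2 (pvGraphFromShifts n shifts) x y = if pvBaseB n shifts x y then 1 else 0 := by
  unfold pvGraphFromShifts
  rw [(pvGFS_fold n x y hn hx hx' hy hy' _ _ (pvShape_empty n hn)).2]
  rw [pvGet2_empty n x y hx hx' hy hy']
  have hiff : ((PySem.List.sorted (PySem.Set.ofList shifts) (fun x => x) false).any (pvValidHitB n x y)) = true ↔
      pvBaseB n shifts x y = true := by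
    simp only [List.any_eq_true, pvBaseB]
    constructor
    · rintro ⟨s, hmem, hs⟩
      rw [PySem.List.mem_sorted, PySem.Set.mem_ofList] at hmem
      exact ⟨s, hmem, hs⟩
    · rintro ⟨s, hmem, hs⟩
      exact ⟨s, by rw [PySem.List.mem_sorted, PySem.Set.mem_ofList]; exact hmem, hs⟩
  by_cases hb : pvBaseB n shifts x y = true
  · rw [if_pos (hiff.mpr hb), if_pos hb]
  · rw [if_neg (fun hh => hb (hiff.mp hh)), if_neg hb]

lemma pvValidHitB_symm (n x y s : Int) : pvValidHitB n x y s = pvValidHitB n y x s := by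
  rw [Bool.eq_iff_iff]
  simp only [pvValidHitB, Bool.and_eq_true, Bool.or_eq_true, decide_eq_true_eq]
  constructor
  · rintro ⟨⟨⟨h1, h2⟩, h3⟩, h4⟩
    exact ⟨⟨⟨h1, h2⟩, fun h => h3 h.symm⟩, h4.symm⟩
  · rintro ⟨⟨⟨h1, h2⟩, h3⟩, h4⟩
    exact ⟨⟨⟨h1, h2⟩, fun h => h3 h.symm⟩, h4.symm⟩

lemma pvSym_gfs (n : Int) (shifts : List Int) (hn : 0 < n) :
    pvSym n (pvGraphFromShifts n shifts) := by
  intro x y hx hx' hy hy'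
  rw [pvGet2_gfs n shifts x y hn hx hx' hy hy', pvGet2_gfs n shifts y x hn hy hy' hx hx']
  have : pvBaseB n shifts x y = pvBaseB n shifts y x := by
    unfold pvBaseB
    congr 1
    funext s
    exact pvValidHitB_symm n x y s
  rw [this]

lemma pvShape_toggle (n : Int) (M : List (List Int)) (i j : Int) (h : pvShape n M) :
    pvShape n (pvToggleEdge M i j) := by
  unfold pvToggleEdge
  by_cases hc : i = j
  · rwa [if_pos hc]
  · rw [if_neg hc]
    exact pvShape_set n _ j i _ (pvShape_set n M i j _ h)

lemma pvGet2_toggle (n : Int) (M : List (List Int)) (i j x y : Int) (h : pvShape n M)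
    (hsym : pvSym n M)
    (hi : 0 ≤ i) (hi' : i < n) (hj : 0 ≤ j) (hj' : j < n) (hij : i ≠ j)
    (hx : 0 ≤ x) (hx' : x < n) (hy : 0 ≤ y) (hy' : y < n) :
    pvGet2 (pvToggleEdge M i j) x y =
      if (x = i ∧ y = j) ∨ (x = j ∧ y = i) then 1 - pvGet2 M x y else pvGet2 M x y := by
  unfold pvToggleEdge
  rw [if_neg hij]
  have hM1 : pvShape n (pvSet2 M i j (1 - pvGet2 M i j)) := pvShape_set n M i j _ h
  have hval : pvGet2 (pvSet2 M i j (1 - pvGet2 M i j)) i j = 1 - pvGet2 M i j := by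
    rw [pvGet2_set n M i j i j _ h hi hi' hj hj' hi hi' hj hj', if_pos ⟨rfl, rfl⟩]
  rw [pvGet2_set n _ j i x y _ hM1 hj hj' hi hi' hx hx' hy hy']
  rw [pvGet2_set n M i j x y _ h hi hi' hj hj' hx hx' hy hy']
  rw [hval]
  by_cases h1 : x = j ∧ y = i
  · rw [if_pos h1, if_pos (Or.inr h1)]
    have : pvGet2 M x y = pvGet2 M i j := by
      rw [h1.1, h1.2]
      exact hsym j i hj hj' hi hi'
    rw [this]
  · rw [if_neg h1]
    by_cases h2 : x = i ∧ y = j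
    · rw [if_pos h2, if_pos (Or.inl h2), h2.1, h2.2]
    · rw [if_neg h2, if_neg (by rintro (hh | hh); exact h2 hh; exact h1 hh)]

lemma pvSym_toggle (n : Int) (M : List (List Int)) (i j : Int) (h : pvShape n M)
    (hsym : pvSym n M)
    (hi : 0 ≤ i) (hi' : i < n) (hj : 0 ≤ j) (hj' : j < n) (hij : i ≠ j) :
    pvSym n (pvToggleEdge M i j) := by
  intro x y hx hx' hy hy'
  rw [pvGet2_toggle n M i j x y h hsym hi hi' hj hj' hij hx hx' hy hy']
  rw [pvGet2_toggle n M i j y x h hsym hi hi' hj hj' hij hy hy' hx hx']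
  by_cases hc : (x = i ∧ y = j) ∨ (x = j ∧ y = i)
  · have hc' : (y = i ∧ x = j) ∨ (y = j ∧ x = i) := by tauto
    rw [if_pos hc, if_pos hc', hsym x y hx hx' hy hy']
  · have hc' : ¬ ((y = i ∧ x = j) ∨ (y = j ∧ x = i)) := by tauto
    rw [if_neg hc, if_neg hc', hsym x y hx hx' hy hy']

-- the corrections fold of port A, cellwise
lemma pvCorrFold (n : Int) (x y : Int) (hn : 0 < n)
    (hx : 0 ≤ x) (hx' : x < n) (hy : 0 ≤ y) (hy' : y < n) :
    ∀ (L : List (Int × Int)) (M : List (List Int)), pvShape n M → pvSym n M →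
      pvGet2 (L.foldl (fun M p => if 0 ≤ p.1 ∧ p.1 < n ∧ 0 ≤ p.2 ∧ p.2 < n ∧ p.1 ≠ p.2 then pvToggleEdge M p.1 p.2 else M) M) x y =
        if (L.countP (pvHitC n x y)) % 2 = 1 then 1 - pvGet2 M x y else pvGet2 M x y := by
  intro L
  induction L with
  | nil => intro M _ _; simp
  | cons p L ih =>
    intro M hM hS
    rw [List.foldl_cons]
    have hM1 : pvShape n (if 0 ≤ p.1 ∧ p.1 < n ∧ 0 ≤ p.2 ∧ p.2 < n ∧ p.1 ≠ p.2 then pvToggleEdge M p.1 p.2 else M) := by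
      by_cases hc : 0 ≤ p.1 ∧ p.1 < n ∧ 0 ≤ p.2 ∧ p.2 < n ∧ p.1 ≠ p.2
      · rw [if_pos hc]; exact pvShape_toggle n M p.1 p.2 hM
      · rwa [if_neg hc]
    have hS1 : pvSym n (if 0 ≤ p.1 ∧ p.1 < n ∧ 0 ≤ p.2 ∧ p.2 < n ∧ p.1 ≠ p.2 then pvToggleEdge M p.1 p.2 else M) := by
      by_cases hc : 0 ≤ p.1 ∧ p.1 < n ∧ 0 ≤ p.2 ∧ p.2 < n ∧ p.1 ≠ p.2
      · rw [if_pos hc]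
        exact pvSym_toggle n M p.1 p.2 hM hS hc.1 hc.2.1 hc.2.2.1 hc.2.2.2.1 hc.2.2.2.2
      · rwa [if_neg hc]
    have hcell1 : pvGet2 (if 0 ≤ p.1 ∧ p.1 < n ∧ 0 ≤ p.2 ∧ p.2 < n ∧ p.1 ≠ p.2 then pvToggleEdge M p.1 p.2 else M) x y =
        if pvHitC n x y p = true then 1 - pvGet2 M x y else pvGet2 M x y := by
      by_cases hc : 0 ≤ p.1 ∧ p.1 < n ∧ 0 ≤ p.2 ∧ p.2 < n ∧ p.1 ≠ p.2
      · rw [if_pos hc]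
        rw [pvGet2_toggle n M p.1 p.2 x y hM hS hc.1 hc.2.1 hc.2.2.1 hc.2.2.2.1 hc.2.2.2.2 hx hx' hy hy']
        by_cases hh : (x = p.1 ∧ y = p.2) ∨ (x = p.2 ∧ y = p.1)
        · have : pvHitC n x y p = true := by
            simp only [pvHitC, Bool.and_eq_true, Bool.or_eq_true, decide_eq_true_eq, Prod.ext_iff]
            refine ⟨⟨⟨⟨⟨hc.1, hc.2.1⟩, hc.2.2.1⟩, hc.2.2.2.1⟩, hc.2.2.2.2⟩, ?_⟩
            rcases hh with ⟨h1, h2⟩ | ⟨h1, h2⟩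
            · exact Or.inl ⟨h1.symm, h2.symm⟩
            · exact Or.inr ⟨h2.symm, h1.symm⟩
          rw [if_pos hh, if_pos this]
        · have : ¬ (pvHitC n x y p = true) := by
            simp only [pvHitC, Bool.and_eq_true, Bool.or_eq_true, decide_eq_true_eq, Prod.ext_iff]
            rintro ⟨-, ⟨h1, h2⟩ | ⟨h1, h2⟩⟩
            · exact hh (Or.inl ⟨h1.symm, h2.symm⟩)
            · exact hh (Or.inr ⟨h2.symm, h1.symm⟩)
          rw [if_neg hh, if_neg this]
      · have : ¬ (pvHitC n x y p = true) := by
          simp only [pvHitC, Bool.and_eq_true, Bool.or_eq_true, decide_eq_true_eq, Prod.ext_iff]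
          rintro ⟨⟨⟨⟨⟨h1, h2⟩, h3⟩, h4⟩, h5⟩, -⟩
          exact hc ⟨h1, h2, h3, h4, h5⟩
        rw [if_neg hc, if_neg this]
    rw [ih _ hM1 hS1, hcell1, List.countP_cons]
    by_cases hp : pvHitC n x y p = true
    · simp only [hp, if_true]
      by_cases ho : (L.countP (pvHitC n x y)) % 2 = 1
      · rw [if_pos ho, if_neg (by omega)]
        ring
      · rw [if_neg ho, if_pos (by omega)]
    · have hf : pvHitC n x y p = false := by revert hp; cases pvHitC n x y p <;> simp
      rw [hf]
      simp

lemma pvShapeSym_corrFold (n : Int) (hn : 0 < n) :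
    ∀ (L : List (Int × Int)) (M : List (List Int)), pvShape n M → pvSym n M →
      pvShape n (L.foldl (fun M p => if 0 ≤ p.1 ∧ p.1 < n ∧ 0 ≤ p.2 ∧ p.2 < n ∧ p.1 ≠ p.2 then pvToggleEdge M p.1 p.2 else M) M) ∧
      pvSym n (L.foldl (fun M p => if 0 ≤ p.1 ∧ p.1 < n ∧ 0 ≤ p.2 ∧ p.2 < n ∧ p.1 ≠ p.2 then pvToggleEdge M p.1 p.2 else M) M) := by
  intro L
  induction L with
  | nil => intro M hM hS; exact ⟨hM, hS⟩
  | cons p L ih =>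
    intro M hM hS
    rw [List.foldl_cons]
    by_cases hc : 0 ≤ p.1 ∧ p.1 < n ∧ 0 ≤ p.2 ∧ p.2 < n ∧ p.1 ≠ p.2
    · have h1 := pvShape_toggle n M p.1 p.2 hM
      have h2 := pvSym_toggle n M p.1 p.2 hM hS hc.1 hc.2.1 hc.2.2.1 hc.2.2.2.1 hc.2.2.2.2
      simp only [if_pos hc]
      exact ih _ h1 h2
    · simp only [if_neg hc]
      exact ih _ hM hS

-- A's result, cellwise
lemma pvShape_A (n : Int) (shifts : List Int) (corrections : List (Int × Int)) (hn : 0 < n) :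
    pvShape n (graph_from_shifts_and_corrections n shifts corrections) := by
  unfold graph_from_shifts_and_corrections
  exact (pvShapeSym_corrFold n hn _ _ (pvShape_gfs n shifts hn) (pvSym_gfs n shifts hn)).1

lemma pvA_cell (n : Int) (shifts : List Int) (corrections : List (Int × Int)) (x y : Int)
    (hn : 0 < n) (hx : 0 ≤ x) (hx' : x < n) (hy : 0 ≤ y) (hy' : y < n) :
    pvGet2 (graph_from_shifts_and_corrections n shifts corrections) x y =
      pvCell n shifts corrections x y := by
  unfold graph_from_shifts_and_corrections
  rw [pvCorrFold n x y hn hx hx' hy hy' _ _ (pvShape_gfs n shifts hn) (pvSym_gfs n shifts hn)]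
  rw [(PySem.List.sorted2_perm corrections _ _ false).countP_eq (pvHitC n x y)]
  rw [pvGet2_gfs n shifts x y hn hx hx' hy hy']
  unfold pvCell
  by_cases hxy : x = y
  · subst hxy
    have hb : pvBaseB n shifts x x = false := by
      apply List.any_eq_false.mpr
      intro s _
      simp [pvValidHitB]
    have hcnt : corrections.countP (pvHitC n x x) = 0 := by
      apply List.countP_eq_zero.mpr
      intro p _
      simp only [pvHitC, Bool.and_eq_true, Bool.or_eq_true, decide_eq_true_eq, Prod.ext_iff]
      rintro ⟨⟨-, h5⟩, ⟨h6, h7⟩ | ⟨h6, h7⟩⟩ <;> exact h5 (by omega)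
    rw [if_pos rfl, hb, hcnt]
    simp
  · rw [if_neg hxy]

-- B's base test equals the shift-existence test
lemma pvB_base (n : Int) (shifts : List Int) (x y : Int) (hn : 0 < n)
    (hx : 0 ≤ x) (hx' : x < n) (hy : 0 ≤ y) (hy' : y < n) (hxy : x ≠ y) :
    PySem.Set.contains (pvValidShifts n shifts)
        (min (PySem.Int.mod (y - x) n) (n - PySem.Int.mod (y - x) n)) =
      pvBaseB n shifts x y := by
  have hfd : PySem.Int.floordiv n 2 = n / 2 := PySem.Int.floordiv_eq_ediv_of_pos (by omega)
  set d := PySem.Int.mod (y - x) n with hd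
  have hd0 : 0 ≤ d := PySem.Int.mod_nonneg _ hn
  have hdn : d < n := PySem.Int.mod_lt _ hn
  have hdvd0 : n ∣ (y - x - d) := ((pvMod_eq_iff n (y - x) d hn).mp hd.symm).2.2
  have hdne : d ≠ 0 := by
    intro h0
    have hdvd : n ∣ (y - x) := by
      have := hdvd0
      rw [h0, sub_zero] at this
      exact this
    have := Int.eq_zero_of_abs_lt_dvd hdvd (abs_lt.mpr ⟨by omega, by omega⟩)
    omega
  have key1 : ∀ s : Int, 0 < s → s ≤ n / 2 → (PySem.Int.mod (x + s) n = y ↔ s = d) := by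
    intro s hs1 hs2
    have hsn : s < n := by omega
    rw [pvMod_eq_iff n (x + s) y hn]
    constructor
    · rintro ⟨-, -, hdvd⟩
      have : PySem.Int.mod (y - x) n = s := by
        refine (pvMod_eq_iff n (y - x) s hn).mpr ⟨by omega, hsn, ?_⟩
        rw [show y - x - s = -(x + s - y) by ring]
        exact dvd_neg.mpr hdvd
      omega
    · intro hs
      subst hs
      refine ⟨hy, hy', ?_⟩
      rw [show x + d - y = -(y - x - d) by ring]
      exact dvd_neg.mpr hdvd0
  have key2 : ∀ s : Int, 0 < s → s ≤ n / 2 → (PySem.Int.mod (y + s) n = x ↔ s = n - d) := by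
    intro s hs1 hs2
    have hsn : s < n := by omega
    rw [pvMod_eq_iff n (y + s) x hn]
    constructor
    · rintro ⟨-, -, hdvd⟩
      have : PySem.Int.mod (y - x) n = n - s := by
        refine (pvMod_eq_iff n (y - x) (n - s) hn).mpr ⟨by omega, by omega, ?_⟩
        rw [show y - x - (n - s) = (y + s - x) - n by ring]
        exact dvd_sub hdvd (dvd_refl n)
      omega
    · intro hs
      refine ⟨hx, hx', ?_⟩
      rw [show y + s - x = (y - x - d) + (s - (n - d)) + n by ring, hs]
      rw [show (y - x - d) + ((n - d) - (n - d)) + n = (y - x - d) + n by ring]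
      exact dvd_add hdvd0 (dvd_refl n)
  rw [Bool.eq_iff_iff, PySem.Set.contains_iff]
  unfold pvValidShifts
  rw [PySem.Set.mem_ofList, List.mem_filter]
  unfold pvBaseB
  rw [List.any_eq_true]
  constructor
  · rintro ⟨hmem, hq⟩
    simp only [Bool.and_eq_true, decide_eq_true_eq, hfd] at hq
    set m := min d (n - d) with hm
    refine ⟨m, hmem, ?_⟩
    simp only [pvValidHitB, Bool.and_eq_true, Bool.or_eq_true, decide_eq_true_eq, hfd]
    refine ⟨⟨⟨hq.1, hq.2⟩, hxy⟩, ?_⟩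
    by_cases hc : d ≤ n - d
    · have : m = d := by omega
      exact Or.inl ((key1 m hq.1 hq.2).mpr this)
    · have : m = n - d := by omega
      exact Or.inr ((key2 m hq.1 hq.2).mpr this)
  · rintro ⟨s, hmem, hs⟩
    simp only [pvValidHitB, Bool.and_eq_true, Bool.or_eq_true, decide_eq_true_eq, hfd] at hs
    obtain ⟨⟨⟨hs1, hs2⟩, -⟩, hhit⟩ := hs
    have hseq : s = min d (n - d) := by
      rcases hhit with hh | hh
      · have := (key1 s hs1 hs2).mp hh
        omega
      · have := (key2 s hs1 hs2).mp hh
        omega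
    rw [← hseq]
    exact ⟨hmem, by simp only [Bool.and_eq_true, decide_eq_true_eq, hfd]; exact ⟨hs1, hs2⟩⟩

-- B's parity dict, pointwise
lemma pvB_parity (n : Int) (corrections : List (Int × Int)) (x y : Int)
    (hx : 0 ≤ x) (hx' : x < n) (hy : 0 ≤ y) (hy' : y < n) (hxy : x ≠ y) :
    (pvParityDict n corrections).getD (min x y, max x y) 0 =
      if (corrections.countP (pvHitC n x y)) % 2 = 1 then 1 else 0 := by
  have hfold : ∀ (L : List (Int × Int)) (dct : PySem.Dict (Int × Int) Int),
      ((L.foldl (fun d p => if 0 ≤ p.1 ∧ p.1 < n ∧ 0 ≤ p.2 ∧ p.2 < n ∧ p.1 ≠ p.2 then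
          d.insert (min p.1 p.2, max p.1 p.2) (1 - d.getD (min p.1 p.2, max p.1 p.2) 0) else d) dct).getD (min x y, max x y) 0) =
        if (L.countP (fun p => decide (0 ≤ p.1) && decide (p.1 < n) && decide (0 ≤ p.2) && decide (p.2 < n) && decide (p.1 ≠ p.2) && decide ((min p.1 p.2, max p.1 p.2) = (min x y, max x y)))) % 2 = 1
        then 1 - dct.getD (min x y, max x y) 0 else dct.getD (min x y, max x y) 0 := by
    intro L
    induction L with
    | nil => intro dct; simp
    | cons p L ih =>
      intro dct
      rw [List.foldl_cons, ih]
      simp only [List.countP_cons]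
      by_cases hb : (decide (0 ≤ p.1) && decide (p.1 < n) && decide (0 ≤ p.2) && decide (p.2 < n) && decide (p.1 ≠ p.2) && decide ((min p.1 p.2, max p.1 p.2) = (min x y, max x y))) = true
      · have hprops := hb
        simp only [Bool.and_eq_true, decide_eq_true_eq] at hprops
        obtain ⟨⟨⟨⟨⟨h1, h2⟩, h3⟩, h4⟩, h5⟩, hkey⟩ := hprops
        rw [if_pos (show (0 ≤ p.1 ∧ p.1 < n ∧ 0 ≤ p.2 ∧ p.2 < n ∧ p.1 ≠ p.2) from ⟨h1, h2, h3, h4, h5⟩)]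
        rw [PySem.Dict.getD_insert, if_pos hkey.symm]
        rw [if_pos hb, hkey]
        by_cases ho : (L.countP (fun p => decide (0 ≤ p.1) && decide (p.1 < n) && decide (0 ≤ p.2) && decide (p.2 < n) && decide (p.1 ≠ p.2) && decide ((min p.1 p.2, max p.1 p.2) = (min x y, max x y)))) % 2 = 1
        · rw [if_pos ho, if_neg (by omega)]
          ring
        · rw [if_neg ho, if_pos (by omega)]
      · have hD' : (if 0 ≤ p.1 ∧ p.1 < n ∧ 0 ≤ p.2 ∧ p.2 < n ∧ p.1 ≠ p.2 then dct.insert (min p.1 p.2, max p.1 p.2) (1 - dct.getD (min p.1 p.2, max p.1 p.2) 0) else dct).getD (min x y, max x y) 0 = dct.getD (min x y, max x y) 0 := by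
          by_cases hc : 0 ≤ p.1 ∧ p.1 < n ∧ 0 ≤ p.2 ∧ p.2 < n ∧ p.1 ≠ p.2
          · have hkn : ¬ ((min p.1 p.2, max p.1 p.2) = (min x y, max x y)) := by
              intro hk
              apply hb
              simp only [Bool.and_eq_true, decide_eq_true_eq]
              exact ⟨⟨⟨⟨⟨hc.1, hc.2.1⟩, hc.2.2.1⟩, hc.2.2.2.1⟩, hc.2.2.2.2⟩, hk⟩
            rw [if_pos hc, PySem.Dict.getD_insert, if_neg (fun hk => hkn hk.symm)]
          · rw [if_neg hc]
        rw [hD', if_neg hb]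
        simp
  unfold pvParityDict
  rw [hfold corrections PySem.Dict.empty]
  have hcnt : corrections.countP (fun p => decide (0 ≤ p.1) && decide (p.1 < n) && decide (0 ≤ p.2) && decide (p.2 < n) && decide (p.1 ≠ p.2) && decide ((min p.1 p.2, max p.1 p.2) = (min x y, max x y))) =
      corrections.countP (pvHitC n x y) := by
    apply List.countP_congr
    intro p _
    rw [Bool.eq_iff_iff]
    simp only [pvHitC, Bool.and_eq_true, Bool.or_eq_true, decide_eq_true_eq, Prod.ext_iff,
      iff_true]
    omega
  rw [hcnt]
  by_cases ho : (corrections.countP (pvHitC n x y)) % 2 = 1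
  · rw [if_pos ho, if_pos ho]
    simp
  · rw [if_neg ho, if_neg ho]
    simp

-- B's rotated base rows, cellwise
lemma pvBaseB_diag (n : Int) (shifts : List Int) (x : Int) :
    pvBaseB n shifts x x = false := by
  apply List.any_eq_false.mpr
  intro s _
  simp [pvValidHitB]

lemma pvShape_rot (n : Int) (shifts : List Int) (hn : 0 < n) :
    pvShape n (pvRotRows n shifts) := by
  have hbl : (pvBaseRow n shifts).length = n.toNat := by
    simp [pvBaseRow, PySem.List.length_pyRange_one]
  constructor
  · simp [pvRotRows, PySem.List.length_pyRange_one]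
    omega
  · intro x hx0 hxn
    have hx : x.toNat < (pvRotRows n shifts).length := by
      simp [pvRotRows, PySem.List.length_pyRange_one]
      omega
    rw [List.getD_eq_getElem _ _ hx]
    simp only [pvRotRows] at hx ⊢
    rw [List.getElem_map, PySem.List.getElem_pyRange_one, zero_add,
      Int.toNat_of_nonneg hx0]
    rw [PySem.List.slice_from (pvBaseRow n shifts) (show (0:Int) ≤ n - x by omega)]
    rw [PySem.List.slice_to (pvBaseRow n shifts) (show (0:Int) ≤ n - x by omega)]
    rw [List.length_append, List.length_drop, List.length_take, hbl]
    omega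

lemma pvRot_cell (n : Int) (shifts : List Int) (x y : Int) (hn : 0 < n)
    (hx : 0 ≤ x) (hx' : x < n) (hy : 0 ≤ y) (hy' : y < n) :
    pvGet2 (pvRotRows n shifts) x y = if pvBaseB n shifts x y then 1 else 0 := by
  have hbl : (pvBaseRow n shifts).length = n.toNat := by
    simp [pvBaseRow, PySem.List.length_pyRange_one]
  have hxlen : x.toNat < (pvRotRows n shifts).length := by
    simp [pvRotRows, PySem.List.length_pyRange_one]
    omega
  unfold pvGet2
  rw [List.getD_eq_getElem _ _ hxlen]
  simp only [pvRotRows] at hxlen ⊢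
  rw [List.getElem_map, PySem.List.getElem_pyRange_one]
  have hxx : (0 : Int) + (x.toNat : Int) = x := by
    rw [Int.toNat_of_nonneg hx]
    ring
  rw [hxx]
  rw [PySem.List.slice_from (pvBaseRow n shifts) (show (0:Int) ≤ n - x by omega)]
  rw [PySem.List.slice_to (pvBaseRow n shifts) (show (0:Int) ≤ n - x by omega)]
  -- the base-row entry at cyclic distance (y - x) mod n
  have hbase : ∀ m : Nat, m < n.toNat →
      (pvBaseRow n shifts).getD m 0 =
        (if (m : Int) = 0 then (0 : Int)
         else if PySem.Set.contains (pvValidShifts n shifts)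
             (min (m : Int) (n - (m : Int))) then 1 else 0) := by
    intro m hm
    rw [List.getD_eq_getElem _ _ (by rw [hbl]; exact hm)]
    simp only [pvBaseRow]
    rw [List.getElem_map, PySem.List.getElem_pyRange_one]
    rw [zero_add]
  set d := PySem.Int.mod (y - x) n with hd
  have hd0 : 0 ≤ d := PySem.Int.mod_nonneg _ hn
  have hdn : d < n := PySem.Int.mod_lt _ hn
  have hgoal : ((pvBaseRow n shifts).drop (n - x).toNat ++
      (pvBaseRow n shifts).take (n - x).toNat).getD y.toNat 0 =
      (pvBaseRow n shifts).getD d.toNat 0 := by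
    by_cases hyx : y < x
    · -- index falls in the dropped (right-rotated) part: entry base[n-x+y], d = y-x+n
      have hdval : d = y - x + n := by
        rw [hd]
        refine (pvMod_eq_iff n (y - x) (y - x + n) hn).mpr ⟨by omega, by omega, ?_⟩
        exact ⟨-1, by ring⟩
      have hylt : y.toNat < ((pvBaseRow n shifts).drop (n - x).toNat).length := by
        rw [List.length_drop, hbl]
        omega
      rw [List.getD_eq_getElem _ _ (by rw [List.length_append]; omega)]
      rw [List.getElem_append_left hylt]
      rw [List.getElem_drop]
      rw [List.getD_eq_getElem _ _ (by rw [hbl]; omega)]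
      congr 1
      omega
    · -- index falls in the taken part: entry base[y-x], d = y-x
      have hdval : d = y - x := by
        rw [hd]
        refine (pvMod_eq_iff n (y - x) (y - x) hn).mpr ⟨by omega, by omega, ?_⟩
        exact ⟨0, by ring⟩
      have hdroplen : ((pvBaseRow n shifts).drop (n - x).toNat).length = x.toNat := by
        rw [List.length_drop, hbl]
        omega
      rw [List.getD_eq_getElem _ _ (by
        rw [List.length_append, hdroplen, List.length_take, hbl]
        omega)]
      rw [List.getElem_append_right (by omega)]
      rw [List.getElem_take]
      rw [List.getD_eq_getElem _ _ (by rw [hbl]; omega)]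
      congr 1
      omega
  rw [hgoal, hbase d.toNat (by omega)]
  rw [Int.toNat_of_nonneg hd0]
  by_cases hxy : x = y
  · have hdz : d = 0 := by
      rw [hd, hxy]
      refine (pvMod_eq_iff n (y - y) 0 hn).mpr ⟨le_rfl, hn, by simp⟩
    rw [if_pos hdz, hxy, pvBaseB_diag]
    simp
  · have hdz : d ≠ 0 := by
      intro h0
      have hdvd : n ∣ (y - x) := by
        have := ((pvMod_eq_iff n (y - x) d hn).mp hd.symm).2.2
        rw [h0, sub_zero] at this
        exact this
      have := Int.eq_zero_of_abs_lt_dvd hdvd (abs_lt.mpr ⟨by omega, by omega⟩)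
      omega
    rw [if_neg hdz, pvB_base n shifts x y hn hx hx' hy hy' hxy]

-- the parity dict has unique, normalised keys
lemma pvParity_nodup (n : Int) (corrections : List (Int × Int)) :
    (pvParityDict n corrections).keys.Nodup := by
  unfold pvParityDict
  have : ∀ (L : List (Int × Int)) (d : PySem.Dict (Int × Int) Int), d.keys.Nodup →
      (L.foldl (fun d p => if 0 ≤ p.1 ∧ p.1 < n ∧ 0 ≤ p.2 ∧ p.2 < n ∧ p.1 ≠ p.2 then
        d.insert (min p.1 p.2, max p.1 p.2) (1 - d.getD (min p.1 p.2, max p.1 p.2) 0) else d) d).keys.Nodup := by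
    intro L
    induction L with
    | nil => intro d hd; exact hd
    | cons p L ih =>
      intro d hd
      rw [List.foldl_cons]
      by_cases hc : 0 ≤ p.1 ∧ p.1 < n ∧ 0 ≤ p.2 ∧ p.2 < n ∧ p.1 ≠ p.2
      · rw [if_pos hc]
        exact ih _ (PySem.Dict.nodup_keys_insert _ _ _ hd)
      · rw [if_neg hc]
        exact ih _ hd
  exact this corrections PySem.Dict.empty (by simp)

lemma pvParity_keys (n : Int) (corrections : List (Int × Int)) :
    ∀ k ∈ (pvParityDict n corrections).keys,
      0 ≤ k.1 ∧ k.1 < n ∧ 0 ≤ k.2 ∧ k.2 < n ∧ k.1 < k.2 := by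
  unfold pvParityDict
  have : ∀ (L : List (Int × Int)) (d : PySem.Dict (Int × Int) Int),
      (∀ k ∈ d.keys, 0 ≤ k.1 ∧ k.1 < n ∧ 0 ≤ k.2 ∧ k.2 < n ∧ k.1 < k.2) →
      ∀ k ∈ (L.foldl (fun d p => if 0 ≤ p.1 ∧ p.1 < n ∧ 0 ≤ p.2 ∧ p.2 < n ∧ p.1 ≠ p.2 then
        d.insert (min p.1 p.2, max p.1 p.2) (1 - d.getD (min p.1 p.2, max p.1 p.2) 0) else d) d).keys,
        0 ≤ k.1 ∧ k.1 < n ∧ 0 ≤ k.2 ∧ k.2 < n ∧ k.1 < k.2 := by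
    intro L
    induction L with
    | nil => intro d hd; exact hd
    | cons p L ih =>
      intro d hd
      rw [List.foldl_cons]
      by_cases hc : 0 ≤ p.1 ∧ p.1 < n ∧ 0 ≤ p.2 ∧ p.2 < n ∧ p.1 ≠ p.2
      · rw [if_pos hc]
        refine ih _ ?_
        intro k hk
        rw [PySem.Dict.mem_keys_insert] at hk
        rcases hk with rfl | hk
        · constructor
          · simp only []
            omega
          · refine ⟨by simp only []; omega, by simp only []; omega, by simp only []; omega, ?_⟩
            simp only []
            omega
        · exact hd k hk
      · rw [if_neg hc]
        exact ih _ hd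
  refine this corrections PySem.Dict.empty ?_
  intro k hk
  rw [PySem.Dict.keys_empty] at hk
  simp at hk

-- hit predicate for one toggle item of B
def pvQB (x y : Int) (p : (Int × Int) × Int) : Bool :=
  decide (p.2 ≠ 0) && (decide (p.1 = (x, y)) || decide (p.1 = (y, x)))

-- B's sparse-toggle pass over parity items, cellwise (no symmetry needed:
-- each item flips its two cells from freshly read values)
lemma pvItemsFold (n x y : Int) (hn : 0 < n)
    (hx : 0 ≤ x) (hx' : x < n) (hy : 0 ≤ y) (hy' : y < n) :
    ∀ (L : List ((Int × Int) × Int)) (R : List (List Int)), pvShape n R →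
      (∀ p ∈ L, 0 ≤ p.1.1 ∧ p.1.1 < n ∧ 0 ≤ p.1.2 ∧ p.1.2 < n ∧ p.1.1 ≠ p.1.2) →
      pvShape n (L.foldl (fun R p =>
        if p.2 ≠ 0 then
          let R1 := pvSet2 R p.1.1 p.1.2 (1 - pvGet2 R p.1.1 p.1.2)
          pvSet2 R1 p.1.2 p.1.1 (1 - pvGet2 R1 p.1.2 p.1.1)
        else R) R) ∧
      pvGet2 (L.foldl (fun R p =>
        if p.2 ≠ 0 then
          let R1 := pvSet2 R p.1.1 p.1.2 (1 - pvGet2 R p.1.1 p.1.2)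
          pvSet2 R1 p.1.2 p.1.1 (1 - pvGet2 R1 p.1.2 p.1.1)
        else R) R) x y =
        if (L.countP (pvQB x y)) % 2 = 1 then 1 - pvGet2 R x y else pvGet2 R x y := by
  intro L
  induction L with
  | nil => intro R hR _; simp [hR]
  | cons p L ih =>
    intro R hR hL
    obtain ⟨ha0, han, hb0, hbn, hab⟩ := hL p List.mem_cons_self
    rw [List.foldl_cons]
    have hstep : ∀ R' : List (List Int), pvShape n R' →
        pvShape n (if p.2 ≠ 0 then
          pvSet2 (pvSet2 R' p.1.1 p.1.2 (1 - pvGet2 R' p.1.1 p.1.2)) p.1.2 p.1.1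
            (1 - pvGet2 (pvSet2 R' p.1.1 p.1.2 (1 - pvGet2 R' p.1.1 p.1.2)) p.1.2 p.1.1)
        else R') := by
      intro R' hR'
      by_cases hv : p.2 ≠ 0
      · rw [if_pos hv]
        exact pvShape_set n _ _ _ _ (pvShape_set n R' _ _ _ hR')
      · rwa [if_neg hv]
    have hM1 := hstep R hR
    have hcell1 : pvGet2 (if p.2 ≠ 0 then
          pvSet2 (pvSet2 R p.1.1 p.1.2 (1 - pvGet2 R p.1.1 p.1.2)) p.1.2 p.1.1
            (1 - pvGet2 (pvSet2 R p.1.1 p.1.2 (1 - pvGet2 R p.1.1 p.1.2)) p.1.2 p.1.1)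
        else R) x y =
        if pvQB x y p = true then 1 - pvGet2 R x y else pvGet2 R x y := by
      by_cases hv : p.2 ≠ 0
      · rw [if_pos hv]
        have hR1 : pvShape n (pvSet2 R p.1.1 p.1.2 (1 - pvGet2 R p.1.1 p.1.2)) :=
          pvShape_set n R _ _ _ hR
        have hba : pvGet2 (pvSet2 R p.1.1 p.1.2 (1 - pvGet2 R p.1.1 p.1.2)) p.1.2 p.1.1 =
            pvGet2 R p.1.2 p.1.1 := by
          rw [pvGet2_set n R p.1.1 p.1.2 p.1.2 p.1.1 _ hR ha0 han hb0 hbn hb0 hbn ha0 han]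
          rw [if_neg (by rintro ⟨h1, -⟩; exact hab h1.symm)]
        rw [hba]
        rw [pvGet2_set n _ p.1.2 p.1.1 x y _ hR1 hb0 hbn ha0 han hx hx' hy hy']
        rw [pvGet2_set n R p.1.1 p.1.2 x y _ hR ha0 han hb0 hbn hx hx' hy hy']
        by_cases h1 : x = p.1.2 ∧ y = p.1.1
        · have hq : pvQB x y p = true := by
            simp only [pvQB, Bool.and_eq_true, Bool.or_eq_true, decide_eq_true_eq, Prod.ext_iff]
            exact ⟨hv, Or.inr ⟨h1.2.symm, h1.1.symm⟩⟩
          rw [if_pos h1, hq, if_pos rfl, h1.1, h1.2]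
        · rw [if_neg h1]
          by_cases h2 : x = p.1.1 ∧ y = p.1.2
          · have hq : pvQB x y p = true := by
              simp only [pvQB, Bool.and_eq_true, Bool.or_eq_true, decide_eq_true_eq, Prod.ext_iff]
              exact ⟨hv, Or.inl ⟨h2.1.symm, h2.2.symm⟩⟩
            rw [if_pos h2, hq, if_pos rfl, h2.1, h2.2]
          · have hq : pvQB x y p = false := by
              have : ¬ (pvQB x y p = true) := by
                simp only [pvQB, Bool.and_eq_true, Bool.or_eq_true, decide_eq_true_eq,
                  Prod.ext_iff]
                rintro ⟨-, ⟨hh1, hh2⟩ | ⟨hh1, hh2⟩⟩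
                · exact h2 ⟨hh1.symm, hh2.symm⟩
                · exact h1 ⟨hh2.symm, hh1.symm⟩
              revert this
              cases pvQB x y p <;> simp
            rw [if_neg h2, hq]
            simp
      · rw [if_neg hv]
        have hq : pvQB x y p = false := by
          simp only [pvQB]
          have : p.2 = 0 := by omega
          simp [this]
        rw [hq]
        simp
    obtain ⟨hsh, hget⟩ := ih _ hM1 (fun q hq => hL q (List.mem_cons_of_mem p hq))
    refine ⟨hsh, ?_⟩
    rw [hget, hcell1, List.countP_cons]
    by_cases hp : pvQB x y p = true
    · simp only [hp, if_true]
      by_cases ho : (L.countP (pvQB x y)) % 2 = 1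
      · rw [if_pos ho, if_neg (show ¬ ((L.countP (pvQB x y) + 1) % 2 = 1) by omega)]
        ring
      · rw [if_neg ho, if_pos (show (L.countP (pvQB x y) + 1) % 2 = 1 by omega)]
    · have hf : pvQB x y p = false := by revert hp; cases pvQB x y p <;> simp
      rw [hf]
      simp

-- in a dict with unique keys, at most one item matches a key: counting
-- key-matching items with non-zero value is a getD test
lemma pvDict_countP (l : List ((Int × Int) × Int)) (K : Int × Int)
    (hnd : ((PySem.Dict.mk l).keys).Nodup) :
    l.countP (fun p => decide (p.1 = K) && decide (p.2 ≠ 0)) =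
      if (PySem.Dict.mk l).getD K 0 ≠ 0 then 1 else 0 := by
  induction l with
  | nil =>
    have h0 : (PySem.Dict.mk ([] : List ((Int × Int) × Int))).getD K 0 = 0 := rfl
    rw [h0]
    simp
  | cons q l ih =>
    have hkeys : ((PySem.Dict.mk (q :: l)).keys) = q.1 :: (PySem.Dict.mk l).keys := by
      simp [PySem.Dict.keys]
    rw [hkeys] at hnd
    simp only [List.countP_cons]
    by_cases hqk : q.1 = K
    · have hgd : (PySem.Dict.mk (q :: l)).getD K 0 = q.2 := by
        rw [PySem.Dict.getD_eq_get?_getD, PySem.Dict.get?_mk_cons,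
          if_pos (beq_iff_eq.mpr hqk)]
        rfl
      have hK : K ∉ (PySem.Dict.mk l).keys := by
        have := (List.nodup_cons.mp hnd).1
        rwa [hqk] at this
      have hcnt0 : l.countP (fun p => decide (p.1 = K) && decide (p.2 ≠ 0)) = 0 := by
        apply List.countP_eq_zero.mpr
        intro p hp
        have hpk : p.1 ∈ (PySem.Dict.mk l).keys := by
          simp only [PySem.Dict.keys]
          exact List.mem_map.mpr ⟨p, hp, rfl⟩
        have hne : p.1 ≠ K := fun hh => hK (hh ▸ hpk)
        simp [hne]
      by_cases hv : q.2 = 0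
      · rw [hcnt0, hgd, show (decide (q.1 = K) && decide (q.2 ≠ 0)) = false by simp [hv]]
        simp [hv]
      · rw [hcnt0, hgd, show (decide (q.1 = K) && decide (q.2 ≠ 0)) = true by simp [hqk, hv]]
        simp [hv]
    · have hgd : (PySem.Dict.mk (q :: l)).getD K 0 = (PySem.Dict.mk l).getD K 0 := by
        rw [PySem.Dict.getD_eq_get?_getD, PySem.Dict.get?_mk_cons,
          if_neg (by simp [hqk]), ← PySem.Dict.getD_eq_get?_getD]
      rw [hgd, ih (List.nodup_cons.mp hnd).2]
      simp [hqk]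

-- B's result, cellwise
lemma pvShape_B (n : Int) (shifts : List Int) (corrections : List (Int × Int)) (hn : 0 < n) :
    pvShape n (graph_from_shifts_and_corrections_alt n shifts corrections) := by
  unfold graph_from_shifts_and_corrections_alt
  refine (pvItemsFold n 0 0 hn le_rfl hn le_rfl hn _ _ (pvShape_rot n shifts hn) ?_).1
  intro p hp
  have := pvParity_keys n corrections p.1 (PySem.Dict.mem_keys_of_mem_items _ hp)
  omega

lemma pvB_cell (n : Int) (shifts : List Int) (corrections : List (Int × Int)) (x y : Int)
    (hn : 0 < n) (hx : 0 ≤ x) (hx' : x < n) (hy : 0 ≤ y) (hy' : y < n) :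
    pvGet2 (graph_from_shifts_and_corrections_alt n shifts corrections) x y =
      pvCell n shifts corrections x y := by
  unfold graph_from_shifts_and_corrections_alt
  have hkeys := pvParity_keys n corrections
  rw [(pvItemsFold n x y hn hx hx' hy hy' _ _ (pvShape_rot n shifts hn)
    (fun p hp => by
      have := hkeys p.1 (PySem.Dict.mem_keys_of_mem_items _ hp)
      omega)).2]
  rw [pvRot_cell n shifts x y hn hx hx' hy hy']
  unfold pvCell
  by_cases hxy : x = y
  · -- diagonal: no item ever matches, base is 0
    have hcnt : ((pvParityDict n corrections).items).countP (pvQB x y) = 0 := by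
      apply List.countP_eq_zero.mpr
      intro p hp
      have hk := hkeys p.1 (PySem.Dict.mem_keys_of_mem_items _ hp)
      simp only [pvQB, Bool.and_eq_true, Bool.or_eq_true, decide_eq_true_eq, Prod.ext_iff]
      rintro ⟨-, ⟨h1, h2⟩ | ⟨h1, h2⟩⟩ <;> omega
    rw [hcnt, if_pos hxy]
    subst hxy
    rw [pvBaseB_diag]
    simp
  · rw [if_neg hxy]
    have hcnt : ((pvParityDict n corrections).items).countP (pvQB x y) =
        ((pvParityDict n corrections).items).countP
          (fun p => decide (p.1 = (min x y, max x y)) && decide (p.2 ≠ 0)) := by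
      apply List.countP_congr
      intro p hp
      have hk := hkeys p.1 (PySem.Dict.mem_keys_of_mem_items _ hp)
      rw [Bool.eq_iff_iff]
      simp only [pvQB, Bool.and_eq_true, Bool.or_eq_true, decide_eq_true_eq, Prod.ext_iff,
        iff_true, true_iff]
      omega
    have hDmk : PySem.Dict.mk ((pvParityDict n corrections).items) = pvParityDict n corrections := by
      apply PySem.Dict.ext
      rfl
    have hcountD := pvDict_countP ((pvParityDict n corrections).items) (min x y, max x y)
      (by rw [hDmk]; exact pvParity_nodup n corrections)
    rw [hDmk] at hcountD
    rw [hcnt, hcountD, pvB_parity n corrections x y hx hx' hy hy' hxy]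
    by_cases hb : pvBaseB n shifts x y = true <;>
      by_cases ho : (corrections.countP (pvHitC n x y)) % 2 = 1 <;>
        simp [hb, ho]

-- degenerate n: both programs return []
lemma pvFoldl_fix {α β : Type} (step : β → α → β) (e : β) (h : ∀ a, step e a = e) :
    ∀ L : List α, L.foldl step e = e := by
  intro L
  induction L with
  | nil => rfl
  | cons a L ih => rw [List.foldl_cons, h a, ih]

lemma pvA_nil (n : Int) (shifts : List Int) (corrections : List (Int × Int)) (hn : n ≤ 0) :
    graph_from_shifts_and_corrections n shifts corrections = [] := by
  have hemp : pvEmptyGraph n = [] := by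
    simp [pvEmptyGraph, PySem.List.pyRange_one_eq_nil hn]
  have hacs : ∀ s : Int, pvAddCirculantShift [] s = [] := by
    intro s
    simp [pvAddCirculantShift, PySem.List.pyRange_one_eq_nil]
  have hgfs : pvGraphFromShifts n shifts = [] := by
    unfold pvGraphFromShifts
    rw [hemp]
    exact pvFoldl_fix _ _ (fun s => by
      by_cases hc : 0 < s ∧ s ≤ PySem.Int.floordiv n 2 <;> simp [hc, hacs]) _
  have htog : ∀ i j : Int, pvToggleEdge [] i j = [] := by
    intro i j
    by_cases hc : i = j <;> simp [pvToggleEdge, pvSet2, pvGet2, hc]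
  unfold graph_from_shifts_and_corrections
  rw [hgfs]
  exact pvFoldl_fix _ _ (fun p => by
    by_cases hc : 0 ≤ p.1 ∧ p.1 < n ∧ 0 ≤ p.2 ∧ p.2 < n ∧ p.1 ≠ p.2 <;> simp [hc, htog]) _

lemma pvB_nil (n : Int) (shifts : List Int) (corrections : List (Int × Int)) (hn : n ≤ 0) :
    graph_from_shifts_and_corrections_alt n shifts corrections = [] := by
  unfold graph_from_shifts_and_corrections_alt
  have hrot : pvRotRows n shifts = [] := by
    simp [pvRotRows, PySem.List.pyRange_one_eq_nil hn]
  rw [hrot]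
  exact pvFoldl_fix _ _ (fun p => by
    by_cases hv : p.2 ≠ 0 <;> simp [hv, pvSet2, pvGet2]) _

lemma pvRowLen (n : Int) (M : List (List Int)) (hM : pvShape n M) (k : Nat)
    (hk : k < M.length) : ((M[k]).length : Int) = n := by
  have h := hM.2 (k : Int) (by positivity) (by have := hM.1; omega)
  simp only [Int.toNat_natCast] at h
  rw [List.getD_eq_getElem _ _ hk] at h
  exact h

lemma pvEntry (M : List (List Int)) (k l : Nat) (hk : k < M.length)
    (hl : l < M[k].length) : M[k][l] = pvGet2 M (k : Int) (l : Int) := by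
  unfold pvGet2
  rw [Int.toNat_natCast, Int.toNat_natCast, List.getD_eq_getElem _ _ hk,
    List.getD_eq_getElem _ _ hl]

-- ===== VERDICT (by name: the statement is the Claim_ definition above) =====
theorem graph_from_shifts_and_corrections_spec : Claim_equal_graph_from_shifts_and_corrections := by
  intro n shifts corrections _
  unfold Spec_graph_from_shifts_and_corrections
  by_cases hn : n ≤ 0
  · rw [pvA_nil n shifts corrections hn, pvB_nil n shifts corrections hn]
  · have hn' : 0 < n := by omega
    have hA := pvShape_A n shifts corrections hn'
    have hB := pvShape_B n shifts corrections hn'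
    apply List.ext_getElem (by have := hA.1; have := hB.1; omega)
    intro k hk1 hk2
    have hk0 : (0 : Int) ≤ (k : Int) := by positivity
    have hkn : (k : Int) < n := by have := hA.1; omega
    apply List.ext_getElem (by
      have h1 := pvRowLen n _ hA k hk1
      have h2 := pvRowLen n _ hB k hk2
      omega)
    intro l hl1 hl2
    have hl0 : (0 : Int) ≤ (l : Int) := by positivity
    have hln : (l : Int) < n := by have := pvRowLen n _ hA k hk1; omega
    rw [pvEntry _ k l hk1 hl1, pvEntry _ k l hk2 hl2]
    rw [pvA_cell n shifts corrections (k : Int) (l : Int) hn' hk0 hkn hl0 hln]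
    rw [pvB_cell n shifts corrections (k : Int) (l : Int) hn' hk0 hkn hl0 hln]
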